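-- pv_equiv track=rewrite | github.com/sruthiscodes/mediconnect | backend/app/services/triage.py | _assess_resource_needs
-- ===== SOURCE A (Python) =====
-- from typing import Dict, Any, List, Optional
--
-- def _assess_resource_needs(symptoms: str, reasoning: Dict[str, Any]) -> int:
--     """
--     Assess anticipated resource needs for ESI classification
--     """
--     # This is a simplified resource assessment
--     # In practice, this would be more sophisticated
--
--     high_resource_indicators = ["imaging", "lab work", "specialist", "procedure"]
--     medium_resource_indicators = ["examination", "medication", "monitoring"]
--
--     symptoms_lower = symptoms.lower()
--     resource_count = 0
--
--     if any(indicator in symptoms_lower for indicator in high_resource_indicators):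
--         resource_count += 2
--     elif any(indicator in symptoms_lower for indicator in medium_resource_indicators):
--         resource_count += 1
--
--     return resource_count
-- ===== SOURCE B (Python) =====
-- def _assess_resource_needs(symptoms: str, reasoning) -> int:
--     # weight table: each indicator mapped to its resource weight
--     weights = {
--         "imaging": 2, "lab work": 2, "specialist": 2, "procedure": 2,
--         "examination": 1, "medication": 1, "monitoring": 1,
--     }
--     s = symptoms.lower()
--     return max((w for ind, w in weights.items() if ind in s), default=0)
-- ===== Notes on version B (the rewrite author's own statement) =====
-- stated objective: simpler
-- what changed: Replaces the two any() scans and if/elif branching with a single indicator->weight dict and one max(..., default=0) over matched weights.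
import Mathlib
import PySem

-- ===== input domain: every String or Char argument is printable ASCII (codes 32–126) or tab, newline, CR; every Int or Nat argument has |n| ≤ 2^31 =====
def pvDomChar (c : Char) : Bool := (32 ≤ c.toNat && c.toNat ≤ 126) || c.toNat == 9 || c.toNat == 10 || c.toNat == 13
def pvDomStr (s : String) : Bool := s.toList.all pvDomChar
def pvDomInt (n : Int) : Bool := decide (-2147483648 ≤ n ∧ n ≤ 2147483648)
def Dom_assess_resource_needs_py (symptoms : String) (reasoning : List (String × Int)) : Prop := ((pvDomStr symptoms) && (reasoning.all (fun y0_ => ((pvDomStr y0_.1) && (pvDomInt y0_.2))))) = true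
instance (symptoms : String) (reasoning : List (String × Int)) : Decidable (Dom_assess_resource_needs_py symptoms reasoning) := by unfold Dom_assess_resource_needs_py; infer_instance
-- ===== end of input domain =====

-- B replaces A's two any()-scans and if/elif branching with one indicator->weight table and a max over matched weights (objective: simpler).


-- ===== PORT A =====
def assess_resource_needs_py (symptoms : String) (reasoning : List (String × Int)) : Int :=
  let high_resource_indicators := ["imaging", "lab work", "specialist", "procedure"]
  let medium_resource_indicators := ["examination", "medication", "monitoring"]
  let symptoms_lower := PySem.Str.lower symptoms
  let resource_count : Int := 0
  if high_resource_indicators.any (fun indicator => PySem.Str.isIn indicator symptoms_lower) then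
    resource_count + 2
  else if medium_resource_indicators.any (fun indicator => PySem.Str.isIn indicator symptoms_lower) then
    resource_count + 1
  else
    resource_count

-- ===== PORT B =====
def assess_resource_needs_py_alt (symptoms : String) (reasoning : List (String × Int)) : Int :=
  let weights : List (String × Int) :=
    [("imaging", 2), ("lab work", 2), ("specialist", 2), ("procedure", 2),
     ("examination", 1), ("medication", 1), ("monitoring", 1)]
  let s := PySem.Str.lower symptoms
  -- max(generator, default=0): fold max over the matched weights starting from 0
  -- (exact here since every weight is positive)
  ((weights.filter (fun p => PySem.Str.isIn p.1 s)).map Prod.snd).foldl max 0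

-- ===== PRECONDITION & SPEC =====
def Spec_assess_resource_needs_py (symptoms : String) (reasoning : List (String × Int)) (out : Int) : Prop := out = assess_resource_needs_py_alt symptoms reasoning
instance (symptoms : String) (reasoning : List (String × Int)) (out : Int) : Decidable (Spec_assess_resource_needs_py symptoms reasoning out) := by unfold Spec_assess_resource_needs_py; infer_instance

-- ===== CLAIM (what is proved, stated in full; the proofs are below) =====
def Claim_equal_assess_resource_needs_py : Prop := ∀ (symptoms : String) (reasoning : List (String × Int)), Dom_assess_resource_needs_py symptoms reasoning → Spec_assess_resource_needs_py symptoms reasoning (assess_resource_needs_py symptoms reasoning)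

-- ===== LEMMAS AND PROOFS =====

-- ===== VERDICT (by name: the statement is the Claim_ definition above) =====
theorem assess_resource_needs_py_spec : Claim_equal_assess_resource_needs_py := by
  intro symptoms reasoning _
  unfold Spec_assess_resource_needs_py assess_resource_needs_py assess_resource_needs_py_alt
  simp only [List.any_cons, List.any_nil, List.filter_cons, List.filter_nil,
    Bool.or_false]
  generalize PySem.Str.isIn "imaging" (PySem.Str.lower symptoms) = b1
  generalize PySem.Str.isIn "lab work" (PySem.Str.lower symptoms) = b2
  generalize PySem.Str.isIn "specialist" (PySem.Str.lower symptoms) = b3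
  generalize PySem.Str.isIn "procedure" (PySem.Str.lower symptoms) = b4
  generalize PySem.Str.isIn "examination" (PySem.Str.lower symptoms) = b5
  generalize PySem.Str.isIn "medication" (PySem.Str.lower symptoms) = b6
  generalize PySem.Str.isIn "monitoring" (PySem.Str.lower symptoms) = b7
  cases b1 <;> cases b2 <;> cases b3 <;> cases b4 <;> cases b5 <;> cases b6 <;> cases b7 <;> decide
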